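-- pv_equiv track=rewrite | github.com/zeusschoolacc/automata | 2-ab-counter/main.py | checkIfAIsEvenAndBIsOdd
-- ===== SOURCE A (Python) =====
-- def checkIfAIsEvenAndBIsOdd(text: str) -> bool:
--     a_count = 0
--     b_count = 0
--
--     for character in text:
--         if character.lower() == 'a':
--             a_count += 1
--         elif character.lower() == 'b':
--             b_count += 1
--         else:
--             return False    # return False if there is another character in the string
--
--     return a_count % 2 == 0 and b_count % 2 == 1
-- ===== SOURCE B (Python) =====
-- def checkIfAIsEvenAndBIsOdd(text: str) -> bool:
--     # Run a DFA over parity states: state bit0 = a-count odd, bit1 = b-count odd.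
--     # Any character other than a/b (case-insensitive) drives into the dead state -1,
--     # which absorbs (no key of DELTA has first component -1). Accepting state is 2
--     # (a even, b odd). No counters, no early exit: just one automaton run.
--     DELTA = {
--         (0, 'a'): 1, (1, 'a'): 0, (2, 'a'): 3, (3, 'a'): 2,
--         (0, 'b'): 2, (1, 'b'): 3, (2, 'b'): 0, (3, 'b'): 1,
--     }
--     state = 0
--     for ch in text:
--         state = DELTA.get((state, ch.lower()), -1)
--     return state == 2
-- ===== Notes on version B (the rewrite author's own statement) =====
-- stated objective: alternative
-- what changed: Replaces A's fused counting loop (two integer counters, early return False on an invalid character, final parity test) by a finite automaton: a 4-state parity DFA given as an explicit transition table, run over the whole string with a dead state absorbing invalid characters, accepting iff the final state is 2.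
import Mathlib
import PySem

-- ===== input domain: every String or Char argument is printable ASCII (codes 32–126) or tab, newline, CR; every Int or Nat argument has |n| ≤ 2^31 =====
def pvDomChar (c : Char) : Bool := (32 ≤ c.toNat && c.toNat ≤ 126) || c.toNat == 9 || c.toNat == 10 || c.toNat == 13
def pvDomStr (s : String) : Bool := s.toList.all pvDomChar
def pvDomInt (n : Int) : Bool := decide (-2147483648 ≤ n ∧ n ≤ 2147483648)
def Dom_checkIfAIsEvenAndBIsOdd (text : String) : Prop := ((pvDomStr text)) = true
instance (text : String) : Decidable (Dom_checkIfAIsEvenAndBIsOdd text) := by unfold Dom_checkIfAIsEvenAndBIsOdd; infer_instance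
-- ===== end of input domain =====

-- B replaces A's fused counting loop (two counters, early return on an invalid
-- character) by a 4-state parity DFA with an explicit transition table and an
-- absorbing dead state, accepting iff the final state is 2 (objective: alternative).

-- ===== PORT A =====
-- the fused loop: counters a_count/b_count, early 'return False' on any other character
def pvGoA : List Char → Int → Int → Bool
  | [], aCnt, bCnt => (PySem.Int.mod aCnt 2 == 0) && (PySem.Int.mod bCnt 2 == 1)
  | c :: rest, aCnt, bCnt =>
    if PySem.Chars.lowerChar c = 'a' then pvGoA rest (aCnt + 1) bCnt
    else if PySem.Chars.lowerChar c = 'b' then pvGoA rest aCnt (bCnt + 1)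
    else false

def checkIfAIsEvenAndBIsOdd (text : String) : Bool :=
  pvGoA text.toList 0 0

-- ===== PORT B =====
-- the DFA's transition table; missing key (dead state or invalid character) → -1
def pvDelta : PySem.Dict (Int × Char) Int :=
  PySem.Dict.ofList
    [((0, 'a'), 1), ((1, 'a'), 0), ((2, 'a'), 3), ((3, 'a'), 2),
     ((0, 'b'), 2), ((1, 'b'), 3), ((2, 'b'), 0), ((3, 'b'), 1)]

def pvStepB (s : Int) (c : Char) : Int :=
  PySem.Dict.getD pvDelta (s, PySem.Chars.lowerChar c) (-1)

def checkIfAIsEvenAndBIsOdd_alt (text : String) : Bool :=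
  (text.toList.foldl pvStepB 0) == 2

-- ===== PRECONDITION & SPEC =====
def Spec_checkIfAIsEvenAndBIsOdd (text : String) (out : Bool) : Prop := out = checkIfAIsEvenAndBIsOdd_alt text
instance (text : String) (out : Bool) : Decidable (Spec_checkIfAIsEvenAndBIsOdd text out) := by unfold Spec_checkIfAIsEvenAndBIsOdd; infer_instance

-- ===== CLAIM =====
def Claim_equal_checkIfAIsEvenAndBIsOdd : Prop := ∀ (text : String), Dom_checkIfAIsEvenAndBIsOdd text → Spec_checkIfAIsEvenAndBIsOdd text (checkIfAIsEvenAndBIsOdd text)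

-- ===== LEMMAS AND PROOFS =====

lemma pvMod_eq (a : Int) : PySem.Int.mod a 2 = a % 2 :=
  PySem.Int.mod_eq_emod_of_pos (by norm_num)

lemma pvDelta_items : pvDelta = PySem.Dict.mk
    [((0, 'a'), 1), ((1, 'a'), 0), ((2, 'a'), 3), ((3, 'a'), 2),
     ((0, 'b'), 2), ((1, 'b'), 3), ((2, 'b'), 0), ((3, 'b'), 1)] := by decide

-- the dead state absorbs: no key of pvDelta has first component -1
lemma pvStep_dead (c : Char) : pvStepB (-1) c = -1 := by
  simp [pvStepB, pvDelta_items, PySem.Dict.getD_eq_get?_getD, PySem.Dict.get?_mk_cons,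
        PySem.Dict.get?]

lemma pvFold_dead (cs : List Char) : cs.foldl pvStepB (-1) = -1 := by
  induction cs with
  | nil => rfl
  | cons c cs ih => simp [List.foldl_cons, pvStep_dead, ih]

-- an invalid character sends every state to the dead state
lemma pvStep_invalid (s : Int) (c : Char)
    (ha : PySem.Chars.lowerChar c ≠ 'a') (hb : PySem.Chars.lowerChar c ≠ 'b') :
    pvStepB s c = -1 := by
  simp [pvStepB, pvDelta_items, PySem.Dict.getD_eq_get?_getD, PySem.Dict.get?_mk_cons,
        PySem.Dict.get?, Ne.symm ha, Ne.symm hb]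

-- main invariant: A's counter loop equals the DFA run started in the state
-- encoding the counters' parities
lemma pvGoA_eq_fold (cs : List Char) : ∀ (a b : Int),
    pvGoA cs a b = (cs.foldl pvStepB (a % 2 + 2 * (b % 2)) == 2) := by
  induction cs with
  | nil =>
    intro a b
    have h1 : a % 2 = 0 ∨ a % 2 = 1 := by omega
    have h2 : b % 2 = 0 ∨ b % 2 = 1 := by omega
    rcases h1 with h1 | h1 <;> rcases h2 with h2 | h2 <;>
      simp [pvGoA, pvMod_eq, h1, h2]
  | cons c cs ih =>
    intro a b
    have h1 : a % 2 = 0 ∨ a % 2 = 1 := by omega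
    have h2 : b % 2 = 0 ∨ b % 2 = 1 := by omega
    by_cases ha : PySem.Chars.lowerChar c = 'a'
    · have step : pvStepB (a % 2 + 2 * (b % 2)) c = (a + 1) % 2 + 2 * (b % 2) := by
        rcases h1 with h1 | h1 <;> rcases h2 with h2 | h2 <;>
          (have h3 : (a + 1) % 2 = 1 - a % 2 := by omega) <;>
          rw [h1, h2, h3] <;> simp [pvStepB, ha] <;> rw [h1] <;> decide
      simp [pvGoA, ha, List.foldl_cons, step, ih (a + 1) b]
    · by_cases hb : PySem.Chars.lowerChar c = 'b'
      · have step : pvStepB (a % 2 + 2 * (b % 2)) c = a % 2 + 2 * ((b + 1) % 2) := by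
          rcases h1 with h1 | h1 <;> rcases h2 with h2 | h2 <;>
            (have h3 : (b + 1) % 2 = 1 - b % 2 := by omega) <;>
            rw [h1, h2, h3] <;> simp [pvStepB, hb] <;> rw [h2] <;> decide
        simp [pvGoA, ha, hb, List.foldl_cons, step, ih a (b + 1)]
      · have step : pvStepB (a % 2 + 2 * (b % 2)) c = -1 := pvStep_invalid _ _ ha hb
        simp [pvGoA, ha, hb, List.foldl_cons, step, pvFold_dead]

-- ===== VERDICT =====
theorem checkIfAIsEvenAndBIsOdd_spec : Claim_equal_checkIfAIsEvenAndBIsOdd := by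
  intro text _
  unfold Spec_checkIfAIsEvenAndBIsOdd checkIfAIsEvenAndBIsOdd checkIfAIsEvenAndBIsOdd_alt
  have := pvGoA_eq_fold text.toList 0 0
  simpa using this
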